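-- pv_equiv track=rewrite | github.com/Blinines/cam_l90_sentiment_detection_review | helpers/helpers_gen.py | sign_test
-- ===== SOURCE A (Python) =====
-- def sign_test(y_1, y_2, y_true):
--     # plus : clf_1 better than clf_2
--     # minus : clf_2 better than clf_1
--     # null : clf_1 and clf_2 predicted the same
--     numbers = {'plus': 0, 'minus': 0, 'null': 0}
--
--     for i in range(len(y_1)):
--         if ((y_1[i] == y_true[i]) and (y_2[i] != y_true[i])):
--             numbers['plus'] += 1
--         elif ((y_1[i] != y_true[i]) and (y_2[i] == y_true[i])):
--             numbers['minus'] += 1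
--         else:
--             numbers['null'] +=1
--
--     return numbers
-- ===== SOURCE B (Python) =====
-- def sign_test(y_1, y_2, y_true):
--     # Inclusion-exclusion on each classifier's correctness: count how often each
--     # classifier is right, and how often both are right at once, then derive the
--     # three sign-test buckets arithmetically.
--     n = len(y_1)
--     c1 = sum(a == t for a, t in zip(y_1, y_true))
--     c2 = sum(b == t for b, t in zip(y_2[:n], y_true))
--     both = sum(a == b == t for a, b, t in zip(y_1, y_2, y_true))
--     return {'plus': c1 - both, 'minus': c2 - both,
--             'null': n - c1 - c2 + 2 * both}
-- ===== Notes on version B (the rewrite author's own statement) =====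
-- stated objective: alternative
-- what changed: Instead of classifying each position into plus/minus/null, B counts each classifier's correct predictions (c1, c2) and the positions where both are correct, then derives the three buckets by inclusion-exclusion: plus = c1 - both, minus = c2 - both, null = n - c1 - c2 + 2*both.
import Mathlib
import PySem

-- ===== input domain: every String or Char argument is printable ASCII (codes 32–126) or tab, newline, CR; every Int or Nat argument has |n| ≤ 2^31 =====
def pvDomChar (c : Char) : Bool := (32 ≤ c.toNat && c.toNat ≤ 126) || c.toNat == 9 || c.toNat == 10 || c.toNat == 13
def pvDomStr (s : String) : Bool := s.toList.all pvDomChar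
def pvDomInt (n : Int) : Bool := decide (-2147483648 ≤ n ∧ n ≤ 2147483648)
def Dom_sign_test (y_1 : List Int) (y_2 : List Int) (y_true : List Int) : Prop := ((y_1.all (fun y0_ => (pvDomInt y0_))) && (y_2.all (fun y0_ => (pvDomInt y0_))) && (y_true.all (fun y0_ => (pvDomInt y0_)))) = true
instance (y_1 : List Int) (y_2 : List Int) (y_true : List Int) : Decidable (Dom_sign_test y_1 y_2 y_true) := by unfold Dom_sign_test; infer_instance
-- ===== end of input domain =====

-- B replaces A's per-position three-way classification by inclusion-exclusion over each
-- classifier's correctness counts (objective: alternative; return value only).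

-- ===== PORT A =====
-- literal port of A: dict with three counters, index loop over range(len(y_1)),
-- branch in the same order, elementwise indexing via pyGetD (valid under Pre_).
def sign_test (y_1 : List Int) (y_2 : List Int) (y_true : List Int) : List (String × Int) :=
  let numbers : PySem.Dict String Int :=
    PySem.Dict.ofList [("plus", 0), ("minus", 0), ("null", 0)]
  let final :=
    (PySem.List.pyRange 0 (y_1.length) 1).foldl (fun d i =>
      if PySem.List.pyGetD y_1 i 0 == PySem.List.pyGetD y_true i 0 &&
         !(PySem.List.pyGetD y_2 i 0 == PySem.List.pyGetD y_true i 0) then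
        d.modify "plus" 0 (· + 1)
      else if !(PySem.List.pyGetD y_1 i 0 == PySem.List.pyGetD y_true i 0) &&
              PySem.List.pyGetD y_2 i 0 == PySem.List.pyGetD y_true i 0 then
        d.modify "minus" 0 (· + 1)
      else
        d.modify "null" 0 (· + 1)) numbers
  final.items

-- ===== PORT B =====
-- literal port of Source B: correctness counts c1, c2, both; buckets by inclusion-exclusion.
def sign_test_alt (y_1 : List Int) (y_2 : List Int) (y_true : List Int) : List (String × Int) :=
  let n : Int := (y_1.length : Int)
  let c1 : Int := ((y_1.zip y_true).countP (fun p => p.1 == p.2) : Int)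
  let c2 : Int := (((PySem.List.slice y_2 none (some n)).zip y_true).countP (fun p => p.1 == p.2) : Int)
  let both : Int := ((y_1.zip (y_2.zip y_true)).countP (fun p => p.1 == p.2.1 && p.2.1 == p.2.2) : Int)
  [("plus", c1 - both), ("minus", c2 - both), ("null", n - c1 - c2 + 2 * both)]

-- ===== PRECONDITION & SPEC =====
-- Pre_ excludes exactly the inputs where A raises IndexError: y_2 or y_true shorter than y_1.
def Pre_sign_test (y_1 : List Int) (y_2 : List Int) (y_true : List Int) : Prop :=
  y_1.length ≤ y_2.length ∧ y_1.length ≤ y_true.length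
instance (y_1 : List Int) (y_2 : List Int) (y_true : List Int) : Decidable (Pre_sign_test y_1 y_2 y_true) := by unfold Pre_sign_test; infer_instance
def pvWitness_sign_test : List Int × List Int × List Int := ([1, 2, 0], [1, 0, 0], [1, 2, 2])

def Spec_sign_test (y_1 : List Int) (y_2 : List Int) (y_true : List Int) (out : List (String × Int)) : Prop := out = sign_test_alt y_1 y_2 y_true
instance (y_1 : List Int) (y_2 : List Int) (y_true : List Int) (out : List (String × Int)) : Decidable (Spec_sign_test y_1 y_2 y_true out) := by unfold Spec_sign_test; infer_instance

-- ===== CLAIM (what is proved, stated in full; the proofs are below) =====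
def Claim_equal_sign_test : Prop := ∀ (y_1 : List Int) (y_2 : List Int) (y_true : List Int), Dom_sign_test y_1 y_2 y_true → Pre_sign_test y_1 y_2 y_true → Spec_sign_test y_1 y_2 y_true (sign_test y_1 y_2 y_true)

-- ===== LEMMAS AND PROOFS =====

-- the branch predicates on a (y1_i, (y2_i, yt_i)) triple
def pvPlusP (p : Int × Int × Int) : Bool := p.1 == p.2.2 && !(p.2.1 == p.2.2)
def pvMinusP (p : Int × Int × Int) : Bool := !(p.1 == p.2.2) && p.2.1 == p.2.2
def pvStep (d : PySem.Dict String Int) (p : Int × Int × Int) : PySem.Dict String Int :=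
  if pvPlusP p then d.modify "plus" 0 (· + 1)
  else if pvMinusP p then d.modify "minus" 0 (· + 1)
  else d.modify "null" 0 (· + 1)

-- A's index loop equals a structural fold of pvStep over the zipped triples
lemma pvFold_idx (y_1 y_2 y_true : List Int) (k : Nat) (d : PySem.Dict String Int)
    (h2 : y_1.length ≤ y_2.length) (h3 : y_1.length ≤ y_true.length) :
    (PySem.List.pyRange (k : Int) (y_1.length) 1).foldl (fun d i =>
      if PySem.List.pyGetD y_1 i 0 == PySem.List.pyGetD y_true i 0 &&
         !(PySem.List.pyGetD y_2 i 0 == PySem.List.pyGetD y_true i 0) then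
        d.modify "plus" 0 (· + 1)
      else if !(PySem.List.pyGetD y_1 i 0 == PySem.List.pyGetD y_true i 0) &&
              PySem.List.pyGetD y_2 i 0 == PySem.List.pyGetD y_true i 0 then
        d.modify "minus" 0 (· + 1)
      else
        d.modify "null" 0 (· + 1)) d
    = ((y_1.drop k).zip ((y_2.drop k).zip (y_true.drop k))).foldl pvStep d := by
  induction hn : y_1.length - k generalizing k d with
  | zero =>
    have hk : y_1.length ≤ k := by omega
    rw [PySem.List.pyRange_one_eq_nil (by exact_mod_cast hk)]
    rw [List.drop_eq_nil_of_le hk]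
    simp
  | succ n ih =>
    have hk : k < y_1.length := by omega
    have hk2 : k < y_2.length := by omega
    have hk3 : k < y_true.length := by omega
    rw [PySem.List.pyRange_one_cons (by exact_mod_cast hk)]
    rw [List.drop_eq_getElem_cons hk, List.drop_eq_getElem_cons hk2,
        List.drop_eq_getElem_cons hk3]
    simp only [List.zip_cons_cons, List.foldl_cons]
    have hget1 : PySem.List.pyGetD y_1 (k : Int) 0 = y_1[k] := by
      rw [PySem.List.pyGetD_natCast]; exact List.getD_eq_getElem _ _ hk
    have hget2 : PySem.List.pyGetD y_2 (k : Int) 0 = y_2[k] := by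
      rw [PySem.List.pyGetD_natCast]; exact List.getD_eq_getElem _ _ hk2
    have hget3 : PySem.List.pyGetD y_true (k : Int) 0 = y_true[k] := by
      rw [PySem.List.pyGetD_natCast]; exact List.getD_eq_getElem _ _ hk3
    rw [hget1, hget2, hget3]
    have hstep : ((k : Int) + 1) = ((k + 1 : Nat) : Int) := by push_cast; ring
    rw [hstep, ih (k + 1) _ (by omega)]
    rfl

-- fold of pvStep over a literal three-key dict counts the three predicates
lemma pvFold_counts (z : List (Int × Int × Int)) (p m u : Int) :
    z.foldl pvStep (PySem.Dict.ofList [("plus", p), ("minus", m), ("null", u)])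
    = PySem.Dict.ofList [("plus", p + (z.countP pvPlusP : Int)),
                         ("minus", m + (z.countP pvMinusP : Int)),
                         ("null", u + ((z.countP (fun q => !(pvPlusP q) && !(pvMinusP q))) : Int))] := by
  induction z generalizing p m u with
  | nil => simp
  | cons x z ih =>
    simp only [List.foldl_cons, List.countP_cons]
    by_cases hp : pvPlusP x
    · have hstep : pvStep (PySem.Dict.ofList [("plus", p), ("minus", m), ("null", u)]) x
          = PySem.Dict.ofList [("plus", p + 1), ("minus", m), ("null", u)] := by
        simp only [pvStep, hp, if_pos]; rfl
      rw [hstep, ih]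
      have hm : pvMinusP x = false := by
        revert hp; simp [pvPlusP, pvMinusP]; intro h1 h2; simp [h1]
      apply congrArg PySem.Dict.ofList
      simp [hp, hm]; omega
    · by_cases hm : pvMinusP x
      · have hstep : pvStep (PySem.Dict.ofList [("plus", p), ("minus", m), ("null", u)]) x
            = PySem.Dict.ofList [("plus", p), ("minus", m + 1), ("null", u)] := by
          simp only [pvStep, hp, hm]; rfl
        rw [hstep, ih]
        apply congrArg PySem.Dict.ofList
        simp [hp, hm]; omega
      · have hstep : pvStep (PySem.Dict.ofList [("plus", p), ("minus", m), ("null", u)]) x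
            = PySem.Dict.ofList [("plus", p), ("minus", m), ("null", u + 1)] := by
          simp only [pvStep, hp, hm]; rfl
        rw [hstep, ih]
        apply congrArg PySem.Dict.ofList
        simp [hp, hm]; omega

lemma pvItems_ofList (p m u : Int) :
    (PySem.Dict.ofList [("plus", p), ("minus", m), ("null", u)]).items
    = [("plus", p), ("minus", m), ("null", u)] := rfl

-- countP splitting: count(a ∧ ¬b) + count(a ∧ b) = count a
lemma pvCountP_split {α : Type} (l : List α) (a b : α → Bool) :
    l.countP (fun x => a x && !(b x)) + l.countP (fun x => a x && b x) = l.countP a := by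
  induction l with
  | nil => simp
  | cons x l ih =>
    simp only [List.countP_cons]
    by_cases ha : a x <;> by_cases hb : b x <;> simp [ha, hb] <;> omega

-- symmetric variant: count(¬a ∧ b) + count(a ∧ b) = count b
lemma pvCountP_split' {α : Type} (l : List α) (a b : α → Bool) :
    l.countP (fun x => !(a x) && b x) + l.countP (fun x => a x && b x) = l.countP b := by
  induction l with
  | nil => simp
  | cons x l ih =>
    simp only [List.countP_cons]
    by_cases ha : a x <;> by_cases hb : b x <;> simp [ha, hb] <;> omega

lemma pvCount_partition (z : List (Int × Int × Int)) :
    z.countP pvPlusP + z.countP pvMinusP + z.countP (fun q => !(pvPlusP q) && !(pvMinusP q)) = z.length := by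
  induction z with
  | nil => simp
  | cons x z ih =>
    simp only [List.countP_cons, List.length_cons]
    by_cases hp : pvPlusP x <;> by_cases hm : pvMinusP x
    · exfalso
      simp only [pvPlusP, Bool.and_eq_true, Bool.not_eq_true'] at hp
      simp only [pvMinusP, Bool.and_eq_true, Bool.not_eq_true'] at hm
      rw [hp.1] at hm
      exact absurd hm.1 (by simp)
    all_goals simp [hp, hm]; omega

-- projecting the triple zip onto components 1,3 gives y_1.zip y_true (when y_2 lasts)
lemma pvZip13 (y_1 y_2 y_true : List Int) (h2 : y_1.length ≤ y_2.length) :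
    (y_1.zip (y_2.zip y_true)).map (fun p => (p.1, p.2.2)) = y_1.zip y_true := by
  induction y_1 generalizing y_2 y_true with
  | nil => simp
  | cons a y_1 ih =>
    cases y_2 with
    | nil => simp at h2
    | cons b y_2 =>
      cases y_true with
      | nil => simp
      | cons t y_true =>
        simp only [List.zip_cons_cons, List.map_cons]
        rw [ih y_2 y_true (by simpa using Nat.le_of_succ_le_succ h2)]

-- projecting onto components 2,3 gives (y_2.take n).zip y_true
lemma pvZip23 (y_1 y_2 y_true : List Int)
    (h2 : y_1.length ≤ y_2.length) (h3 : y_1.length ≤ y_true.length) :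
    (y_1.zip (y_2.zip y_true)).map (fun p => (p.2.1, p.2.2))
    = (y_2.take y_1.length).zip y_true := by
  induction y_1 generalizing y_2 y_true with
  | nil => simp
  | cons a y_1 ih =>
    cases y_2 with
    | nil => simp at h2
    | cons b y_2 =>
      cases y_true with
      | nil => simp at h3
      | cons t y_true =>
        simp only [List.zip_cons_cons, List.map_cons, List.length_cons, List.take_succ_cons]
        rw [ih y_2 y_true (by simpa using Nat.le_of_succ_le_succ h2)
              (by simpa using Nat.le_of_succ_le_succ h3)]

-- the two formulations of "both correct" agree pointwise
lemma pvBoth_eq (z : List (Int × Int × Int)) :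
    z.countP (fun p => p.1 == p.2.1 && p.2.1 == p.2.2)
    = z.countP (fun p => p.1 == p.2.2 && p.2.1 == p.2.2) := by
  apply List.countP_congr
  intro p _
  by_cases h : p.2.1 = p.2.2
  · simp [h]
  · simp [h]

-- ===== VERDICT (by name: the statement is the Claim_ definition above) =====
theorem sign_test_spec : Claim_equal_sign_test := by
  intro y_1 y_2 y_true _ hpre
  obtain ⟨h2, h3⟩ := hpre
  unfold Spec_sign_test sign_test sign_test_alt
  dsimp only
  have hidx := pvFold_idx y_1 y_2 y_true 0
      (PySem.Dict.ofList [("plus", 0), ("minus", 0), ("null", 0)]) h2 h3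
  simp only [Nat.cast_zero, List.drop_zero] at hidx
  rw [hidx, pvFold_counts, pvItems_ofList]
  set z := y_1.zip (y_2.zip y_true) with hz
  have hlen : z.length = y_1.length := by
    simp [hz, List.length_zip]; omega
  -- B's three counts expressed as counts over z
  have hslice : PySem.List.slice y_2 none (some ((y_1.length : Nat) : Int)) = y_2.take y_1.length :=
    PySem.List.slice_to_natCast _ _
  have hc1 : (y_1.zip y_true).countP (fun p => p.1 == p.2)
      = z.countP (fun p => p.1 == p.2.2) := by
    rw [← pvZip13 y_1 y_2 y_true h2, List.countP_map]; rfl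
  have hc2 : ((y_2.take y_1.length).zip y_true).countP (fun p => p.1 == p.2)
      = z.countP (fun p => p.2.1 == p.2.2) := by
    rw [← pvZip23 y_1 y_2 y_true h2 h3, List.countP_map]; rfl
  have hboth := pvBoth_eq z
  -- splitting identities
  have hp : z.countP pvPlusP + z.countP (fun p => p.1 == p.2.2 && p.2.1 == p.2.2)
      = z.countP (fun p => p.1 == p.2.2) :=
    pvCountP_split z (fun p => p.1 == p.2.2) (fun p => p.2.1 == p.2.2)
  have hm : z.countP pvMinusP + z.countP (fun p => p.1 == p.2.2 && p.2.1 == p.2.2)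
      = z.countP (fun p => p.2.1 == p.2.2) :=
    pvCountP_split' z (fun p => p.1 == p.2.2) (fun p => p.2.1 == p.2.2)
  have hpart := pvCount_partition z
  rw [hslice, hc1, hc2, hboth]
  simp only [List.cons.injEq, Prod.mk.injEq]
  refine ⟨⟨trivial, by omega⟩, ⟨trivial, by omega⟩,
          ⟨trivial, by rw [← hlen]; omega⟩, trivial⟩
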